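-- pv_equiv track=rewrite | github.com/JammalAdeyemi/Ppython | Hackerrank/Tech_connect.py | deleteProducts
-- ===== SOURCE A (Python) =====
-- from collections import Counter
--
-- def deleteProducts(ids, m):
--     # count the frequency of each item id
--     freq = Counter(ids)
--     # create a list where index i is the count of item ids that appear i times
--     buckets = [0] * (len(ids) + 1)
--
--     for id, frequency in freq.items():
--         buckets[frequency] += 1
--     distinct_ids = len(freq)
--
--     for i in range(len(buckets)):
--         # if the smallest frequency can be completely removed
--         if m >= i * buckets[i]:
--             # decrease m by the total deletions
--             m -= i * buckets[i]
--             # decrease the number of distinct ids by the number of ids with that frequency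
--             distinct_ids -= buckets[i]
--         else:
--             # decrease the number of distinct ids by maximum possible deletions
--             distinct_ids -= m // i
--             break
--
--     return distinct_ids
-- ===== SOURCE B (Python) =====
-- from collections import Counter
--
-- def deleteProducts(ids, m):
--     freq = Counter(ids)
--     distinct = len(freq)
--     for f in sorted(freq.values()):
--         if m >= f:
--             m -= f
--             distinct -= 1
--         else:
--             break
--     return distinct
-- ===== Notes on version B (the rewrite author's own statement) =====
-- stated objective: simpler
-- what changed: Replaces A's frequency-indexed bucket histogram and grouped i*buckets[i] arithmetic with a plain ascending scan of sorted(Counter(ids).values()), removing one id's frequency at a time.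
-- crash fix: For every m < 0 A raises ZeroDivisionError (the i=0 else branch computes m // 0), while B returns the number of distinct ids unchanged. — e.g. on deleteProducts([1], -1): A raises ZeroDivisionError, B returns 1
import Mathlib
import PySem

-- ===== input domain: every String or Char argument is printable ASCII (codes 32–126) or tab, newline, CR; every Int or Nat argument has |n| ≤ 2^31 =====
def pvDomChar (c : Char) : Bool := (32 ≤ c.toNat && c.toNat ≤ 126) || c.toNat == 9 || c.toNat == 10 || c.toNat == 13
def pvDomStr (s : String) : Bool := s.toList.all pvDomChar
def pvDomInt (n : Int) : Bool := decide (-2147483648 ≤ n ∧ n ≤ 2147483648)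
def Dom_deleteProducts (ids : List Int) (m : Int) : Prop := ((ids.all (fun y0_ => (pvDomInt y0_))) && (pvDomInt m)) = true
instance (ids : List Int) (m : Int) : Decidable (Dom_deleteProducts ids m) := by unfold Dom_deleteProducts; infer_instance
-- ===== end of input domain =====

-- B replaces A's frequency-indexed bucket histogram and grouped arithmetic with a plain
-- sorted scan of the frequency list (simpler); equivalence is claimed for m ≥ 0 (Pre_),
-- since A raises ZeroDivisionError for every negative m.

-- ===== PORT A =====
-- the 'for i in range(len(buckets))' loop with its break, walking the buckets with index i
def pvLoopA : List Int → Int → Int → Int → Int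
  | [], _, _, d => d
  | b :: rest, i, m, d =>
      if m ≥ i * b then pvLoopA rest (i + 1) (m - i * b) (d - b)
      else d - PySem.Int.floordiv m i

def deleteProducts (ids : List Int) (m : Int) : Int :=
  let freq := PySem.Dict.counter ids
  let buckets :=
    freq.items.foldl
      (fun bs p => PySem.List.pySetD bs p.2 (PySem.List.pyGetD bs p.2 0 + 1))
      (List.replicate (ids.length + 1) 0)
  pvLoopA buckets 0 m freq.size

-- ===== PORT B =====
-- the 'for f in sorted(freq.values())' loop with its break
def pvScanB : List Int → Int → Int → Int
  | [], _, d => d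
  | f :: t, m, d => if m ≥ f then pvScanB t (m - f) (d - 1) else d

def deleteProducts_alt (ids : List Int) (m : Int) : Int :=
  let freq := PySem.Dict.counter ids
  pvScanB (PySem.List.sorted freq.values (fun x => x) false) m freq.size

-- ===== PRECONDITION & SPEC =====
-- A computes m // 0 (ZeroDivisionError) whenever m < 0, so equivalence is claimed for 0 ≤ m.
def Pre_deleteProducts (ids : List Int) (m : Int) : Prop := 0 ≤ m
instance (ids : List Int) (m : Int) : Decidable (Pre_deleteProducts ids m) := by unfold Pre_deleteProducts; infer_instance
def pvWitness_deleteProducts : List Int × Int := ([1, 1, 2], 1)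

-- On every input with m < 0 A raises ZeroDivisionError, while B returns the number of distinct ids.
def Raises_deleteProducts (ids : List Int) (m : Int) : Prop := m < 0
instance (ids : List Int) (m : Int) : Decidable (Raises_deleteProducts ids m) := by unfold Raises_deleteProducts; infer_instance
def pvRaiseWitness_deleteProducts : List Int × Int := ([1], -1)
def pvRaiseWitnessOut_deleteProducts : Int := 1

def Spec_deleteProducts (ids : List Int) (m : Int) (out : Int) : Prop := out = deleteProducts_alt ids m
instance (ids : List Int) (m : Int) (out : Int) : Decidable (Spec_deleteProducts ids m out) := by unfold Spec_deleteProducts; infer_instance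

-- ===== CLAIM (what is proved, stated in full; the proofs are below) =====
def Claim_equal_deleteProducts : Prop := ∀ (ids : List Int) (m : Int), Dom_deleteProducts ids m → Pre_deleteProducts ids m → Spec_deleteProducts ids m (deleteProducts ids m)
def Claim_raises_deleteProducts : Prop := (∀ (ids : List Int) (m : Int), Dom_deleteProducts ids m → Raises_deleteProducts ids m → ¬ Pre_deleteProducts ids m) ∧ (Dom_deleteProducts (pvRaiseWitness_deleteProducts.1) (pvRaiseWitness_deleteProducts.2) ∧ Raises_deleteProducts (pvRaiseWitness_deleteProducts.1) (pvRaiseWitness_deleteProducts.2) ∧ deleteProducts_alt (pvRaiseWitness_deleteProducts.1) (pvRaiseWitness_deleteProducts.2) = pvRaiseWitnessOut_deleteProducts)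

-- ===== LEMMAS AND PROOFS =====

-- histogram fold: the resulting bucket at j counts the occurrences of j among the folded values
theorem pv_hist_length (vs bs : List Int) :
    (vs.foldl (fun bs v => PySem.List.pySetD bs v (PySem.List.pyGetD bs v 0 + 1)) bs).length
      = bs.length := by
  induction vs generalizing bs with
  | nil => rfl
  | cons v t ih => simp [List.foldl, ih, PySem.List.length_pySetD]

theorem pv_hist_getD (vs : List Int) (bs : List Int)
    (hv : ∀ v ∈ vs, 0 ≤ v ∧ v.toNat < bs.length) (j : Nat) :
    (vs.foldl (fun bs v => PySem.List.pySetD bs v (PySem.List.pyGetD bs v 0 + 1)) bs).getD j 0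
      = bs.getD j 0 + (vs.count (j : Int) : Int) := by
  induction vs generalizing bs with
  | nil => simp
  | cons v t ih =>
      obtain ⟨hv0, hvlt⟩ := hv v (by simp)
      have hset : PySem.List.pySetD bs v (PySem.List.pyGetD bs v 0 + 1)
          = bs.set v.toNat (bs.getD v.toNat 0 + 1) := by
        rw [PySem.List.pySetD_of_nonneg _ _ hv0,
          PySem.List.pyGetD_eq_getElem _ _ hv0 (by omega)]
        simp [List.getD, List.getElem?_eq_getElem hvlt]
      have hlen : ∀ w ∈ t, 0 ≤ w ∧ w.toNat < (bs.set v.toNat (bs.getD v.toNat 0 + 1)).length := by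
        intro w hw
        have := hv w (List.mem_cons_of_mem _ hw)
        rwa [List.length_set]
      rw [List.foldl_cons, hset, ih _ hlen]
      by_cases hj : v.toNat = j
      · subst hj
        have hveq : ((v.toNat : Nat) : Int) = v := by omega
        have hset2 : (bs.set v.toNat (bs.getD v.toNat 0 + 1)).getD v.toNat 0
            = bs.getD v.toNat 0 + 1 := by
          simp [List.getD, List.getElem?_set_self', List.getElem?_eq_getElem hvlt]
        rw [hset2, hveq, List.count_cons_self]
        push_cast
        ring
      · have hvne : v ≠ (j : Int) := by omega
        simp [List.getD, List.getElem?_set_ne hj, List.count_cons, hvne]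

-- splitting a sorted list bounded below by i into its i-block and the rest
theorem pv_sorted_split (ws : List Int) (i : Int)
    (hs : ws.Pairwise (· ≤ ·)) (hlb : ∀ w ∈ ws, i ≤ w) :
    ∃ ws', ws = List.replicate (ws.count i) i ++ ws' ∧ ws'.Pairwise (· ≤ ·)
      ∧ (∀ w ∈ ws', i + 1 ≤ w) ∧ (∀ w ∈ ws', w ∈ ws)
      ∧ ∀ x : Int, x ≠ i → ws'.count x = ws.count x := by
  induction ws with
  | nil => exact ⟨[], by simp⟩
  | cons w t ih =>
      rcases List.pairwise_cons.mp hs with ⟨hwle, hts⟩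
      by_cases hw : w = i
      · subst hw
        obtain ⟨ws', ht, hp, hb, hmem, hc⟩ := ih hts (fun x hx => hlb x (by simp [hx]))
        refine ⟨ws', ?_, hp, hb, fun x hx => by simp [hmem x hx], ?_⟩
        · simp [List.count_cons, List.replicate_succ]
          exact ht
        · intro x hx
          rw [hc x hx, List.count_cons]
          simp
          exact fun h => hx h.symm
      · have hwi : i < w := lt_of_le_of_ne (hlb w (by simp)) (by omega)
        have hcnt : (w :: t).count i = 0 := by
          refine List.count_eq_zero.mpr ?_
          intro h
          rcases List.mem_cons.mp h with h | h
          · omega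
          · have := hwle i h; omega
        refine ⟨w :: t, by simp [hcnt], hs, ?_, fun x hx => hx, fun x _ => rfl⟩
        intro x hx
        rcases List.mem_cons.mp hx with h | h
        · omega
        · have := hwle x h; omega

-- scanning the i-block when the whole block can be removed (m ≥ i*k)
theorem pv_scan_replicate_full (k : Nat) (i m d : Int) (ws' : List Int)
    (hi : 0 ≤ i) (hm : i * k ≤ m) :
    pvScanB (List.replicate k i ++ ws') m d = pvScanB ws' (m - i * k) (d - k) := by
  induction k generalizing m d with
  | zero => simp [pvScanB]
  | succ n ih =>
      have h1 : i ≤ m := by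
        push_cast at hm
        nlinarith [mul_nonneg hi (Int.natCast_nonneg n)]
      have : pvScanB (List.replicate (n + 1) i ++ ws') m d
          = pvScanB (List.replicate n i ++ ws') (m - i) (d - 1) := by
        simp [List.replicate_succ, pvScanB, h1]
      rw [this, ih (m - i) (d - 1) (by push_cast at hm ⊢; nlinarith)]
      congr 1 <;> push_cast <;> ring

-- scanning the i-block when it cannot all be removed (m < i*k): exactly m // i steps
theorem pv_scan_replicate_part (k : Nat) (i m d : Int) (ws' : List Int)
    (hi : 0 < i) (hm0 : 0 ≤ m) (hm : m < i * k) :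
    pvScanB (List.replicate k i ++ ws') m d = d - PySem.Int.floordiv m i := by
  induction k generalizing m d with
  | zero => simp at hm; omega
  | succ n ih =>
      by_cases hge : i ≤ m
      · have : pvScanB (List.replicate (n + 1) i ++ ws') m d
            = pvScanB (List.replicate n i ++ ws') (m - i) (d - 1) := by
          simp [List.replicate_succ, pvScanB, hge]
        rw [this, ih (m - i) (d - 1) (by omega) (by push_cast at hm ⊢; nlinarith)]
        rw [PySem.Int.floordiv_eq_ediv_of_pos hi, PySem.Int.floordiv_eq_ediv_of_pos hi]
        have : m - i = m + (-1) * i := by ring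
        rw [this, Int.add_mul_ediv_right _ _ (by omega)]
        ring
      · have h0 : pvScanB (List.replicate (n + 1) i ++ ws') m d = d := by
          simp [List.replicate_succ, pvScanB, hge]
        rw [h0, PySem.Int.floordiv_eq_ediv_of_pos hi,
          Int.ediv_eq_zero_of_lt hm0 (by omega)]
        ring

-- the bucket walk equals the sorted scan
theorem pv_main (bs : List Int) (ws : List Int) (i m d : Int)
    (hi : 0 ≤ i) (hm : 0 ≤ m) (hs : ws.Pairwise (· ≤ ·))
    (hb : ∀ w ∈ ws, i ≤ w ∧ w < i + bs.length)
    (hc : ∀ j : Nat, j < bs.length → bs.getD j 0 = (ws.count (i + j) : Int)) :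
    pvLoopA bs i m d = pvScanB ws m d := by
  induction bs generalizing ws i m d with
  | nil =>
      have : ws = [] := by
        cases ws with
        | nil => rfl
        | cons w t =>
            exfalso
            have := hb w (by simp)
            simp at this
            omega
      simp [this, pvLoopA, pvScanB]
  | cons b rest ih =>
      have hb0 : b = (ws.count i : Int) := by simpa using hc 0 (by simp)
      obtain ⟨ws', hsplit, hp', hlb', hmem', hcnt'⟩ :=
        pv_sorted_split ws i hs (fun w hw => (hb w hw).1)
      by_cases hge : i * b ≤ m
      · rw [show pvLoopA (b :: rest) i m d = pvLoopA rest (i + 1) (m - i * b) (d - b) by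
          simp [pvLoopA, hge]]
        rw [hsplit, hb0]
        rw [pv_scan_replicate_full (ws.count i) i m d ws' hi (by rwa [← hb0])]
        have hm' : 0 ≤ m - i * (ws.count i : Int) := by rw [hb0] at hge; linarith
        refine ih ws' (i + 1) _ _ (by omega) hm' hp'
          (by
            intro w hw
            refine ⟨hlb' w hw, ?_⟩
            have := (hb w (hmem' w hw)).2
            simp at this ⊢
            omega)
          (by
            intro j hj
            have h1 := hc (j + 1) (by simpa using Nat.succ_lt_succ hj)
            simp at h1
            rw [show i + 1 + (j : Int) = i + ((j : Int) + 1) by ring,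
              hcnt' _ (by omega)]
            simpa [add_assoc] using h1)
      · have hipos : 0 < i := by
          rcases lt_or_eq_of_le hi with h | h
          · exact h
          · exfalso
            have hbnn : 0 ≤ b := by
              rw [hb0]; exact Int.natCast_nonneg _
            rw [← h] at hge; simp at hge; omega
        rw [show pvLoopA (b :: rest) i m d = d - PySem.Int.floordiv m i by
          simp [pvLoopA, hge]]
        rw [hsplit]
        exact (pv_scan_replicate_part (ws.count i) i m d ws' hipos hm
          (by rw [← hb0]; omega)).symm

-- ===== VERDICT (by name: the statement is the Claim_ definition above) =====
theorem deleteProducts_spec : Claim_equal_deleteProducts := by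
  intro ids m _ hpre
  show deleteProducts ids m = deleteProducts_alt ids m
  show pvLoopA
      ((PySem.Dict.counter ids).items.foldl
        (fun bs p => PySem.List.pySetD bs p.2 (PySem.List.pyGetD bs p.2 0 + 1))
        (List.replicate (ids.length + 1) 0)) 0 m ((PySem.Dict.counter ids).size : Int)
    = pvScanB (PySem.List.sorted (PySem.Dict.counter ids).values (fun x => x) false) m
        ((PySem.Dict.counter ids).size : Int)
  have hvals : (PySem.Dict.counter ids).values
      = (PySem.Set.ofList ids).map (fun k => (ids.count k : Int)) := by
    show ((PySem.Dict.counter ids).items).map (·.2) = _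
    rw [PySem.Dict.items_counter]
    simp
  have hfold :
      (PySem.Dict.counter ids).items.foldl
        (fun bs p => PySem.List.pySetD bs p.2 (PySem.List.pyGetD bs p.2 0 + 1))
        (List.replicate (ids.length + 1) (0 : Int))
      = ((PySem.Dict.counter ids).items.map (·.2)).foldl
        (fun bs v => PySem.List.pySetD bs v (PySem.List.pyGetD bs v 0 + 1))
        (List.replicate (ids.length + 1) (0 : Int)) := by
    rw [List.foldl_map]
  set vals := (PySem.Dict.counter ids).values with hv
  have hvmem : ∀ v ∈ vals, 0 ≤ v ∧ v.toNat < ids.length + 1 := by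
    intro v hvv
    rw [hvals] at hvv
    simp at hvv
    obtain ⟨k, hk, hkv⟩ := hvv
    have hk' : k ∈ ids := hk
    have h1 : 1 ≤ ids.count k := List.one_le_count_iff.mpr hk'
    have h2 : ids.count k ≤ ids.length := List.count_le_length
    omega
  set ws := PySem.List.sorted vals (fun x => x) false with hw
  have hperm : ws.Perm vals := PySem.List.sorted_perm vals (fun x => x) false
  refine (congrArg (fun bs => pvLoopA bs 0 m ((PySem.Dict.counter ids).size : Int)) hfold).trans ?_
  refine pv_main _ ws 0 m _ le_rfl hpre ?_ ?_ ?_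
  · exact PySem.List.sorted_pairwise vals (fun x => x)
  · intro w hww
    have : w ∈ vals := hperm.mem_iff.mp hww
    have := hvmem w this
    rw [pv_hist_length]
    simp
    omega
  · intro j hj
    rw [pv_hist_length, List.length_replicate] at hj
    have hvm' : ∀ v ∈ (PySem.Dict.counter ids).items.map (fun x => x.2),
        0 ≤ v ∧ v.toNat < (List.replicate (ids.length + 1) (0 : Int)).length := by
      intro v hv2
      simpa [List.length_replicate] using hvmem v hv2
    rw [pv_hist_getD _ _ hvm' j, List.getD_replicate _ (by omega), hperm.count_eq]
    simp [hv, PySem.Dict.values]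

@[simp] theorem deleteProducts_raises : Claim_raises_deleteProducts := by
  unfold Claim_raises_deleteProducts
  constructor
  · intro ids m _ hr hp
    exact absurd hp (by unfold Pre_deleteProducts Raises_deleteProducts at *; omega)
  · exact ⟨by decide, by decide, by decide⟩
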